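-- pv_equiv track=rewrite | github.com/arkrajkundu/autocuro-technologies-assignment | main.py | place_rectangles
-- ===== SOURCE A (Python) =====
-- def place_rectangles(space, rectangles):
--     if not rectangles:
--         return []
--
--     rect = rectangles[0]
--     remaining_rects = rectangles[1:]
--
--     width, height = rect
--     space_width, space_height, space_x, space_y = space
--
--     # Try placing the rectangle without rotation
--     if width <= space_width and height <= space_height:
--         # Place rectangle and split remaining space
--         remaining_space_1 = (space_width - width - 1, space_height, space_x + width + 1, space_y)
--         remaining_space_2 = (width, space_height - height - 1, space_x, space_y + height + 1)
--         return [(space_x, space_y, width, height)] + place_rectangles(remaining_space_1, remaining_rects) + place_rectangles(remaining_space_2, remaining_rects)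
--
--     # Try placing the rectangle with rotation
--     if height <= space_width and width <= space_height:
--         # Rotate and place
--         remaining_space_1 = (space_width - height - 1, space_height, space_x + height + 1, space_y)
--         remaining_space_2 = (height, space_height - width - 1, space_x, space_y + width + 1)
--         return [(space_x, space_y, height, width)] + place_rectangles(remaining_space_1, remaining_rects) + place_rectangles(remaining_space_2, remaining_rects)
--
--     # If we cannot place the rectangle, return error
--     raise ValueError("Placement not possible for this rectangle configuration")
-- ===== SOURCE B (Python) =====
-- def place_rectangles(space, rectangles):
--     out = []
--     stack = [(space, rectangles)]
--     while stack:
--         (W, H, x, y), rects = stack.pop()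
--         if not rects:
--             continue
--         (w, h), rest = rects[0], rects[1:]
--         if w <= W and h <= H:
--             pw, ph = w, h
--         elif h <= W and w <= H:
--             pw, ph = h, w
--         else:
--             raise ValueError("Placement not possible for this rectangle configuration")
--         out.append((x, y, pw, ph))
--         # push right subspace first, left second: left is popped (processed) first
--         stack.append(((pw, H - ph - 1, x, y + ph + 1), rest))
--         stack.append(((W - pw - 1, H, x + pw + 1, y), rest))
--     return out
-- ===== Notes on version B (the rewrite author's own statement) =====
-- stated objective: alternative
-- what changed: Replaces A's binary recursion with list concatenation by an explicit stack of (space, rectangles) tasks and a single output list appended in place (right subspace pushed before left to keep preorder).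
import Mathlib
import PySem

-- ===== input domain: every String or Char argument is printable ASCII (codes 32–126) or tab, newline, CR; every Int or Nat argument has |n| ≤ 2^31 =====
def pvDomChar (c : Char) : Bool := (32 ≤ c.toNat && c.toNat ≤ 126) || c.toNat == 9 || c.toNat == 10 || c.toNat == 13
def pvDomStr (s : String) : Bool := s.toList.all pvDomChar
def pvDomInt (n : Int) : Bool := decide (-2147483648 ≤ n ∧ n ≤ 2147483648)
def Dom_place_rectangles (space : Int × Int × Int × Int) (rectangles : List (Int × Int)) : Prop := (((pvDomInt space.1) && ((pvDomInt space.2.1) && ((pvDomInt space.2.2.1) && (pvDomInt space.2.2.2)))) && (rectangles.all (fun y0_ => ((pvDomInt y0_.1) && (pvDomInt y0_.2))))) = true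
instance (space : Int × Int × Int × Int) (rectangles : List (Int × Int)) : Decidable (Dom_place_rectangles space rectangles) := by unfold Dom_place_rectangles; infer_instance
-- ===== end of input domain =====

-- B replaces A's binary recursion (with list concatenation) by an explicit work stack and one
-- accumulated output list; same placements in the same preorder. Equivalence on Pre_ (no ValueError).

-- ===== PORT A =====
-- Literal port of A's recursion; the final 'raise ValueError' branch returns [] here and is
-- excluded by Pre_place_rectangles.
def place_rectangles (space : Int × Int × Int × Int) (rectangles : List (Int × Int)) : List (Int × Int × Int × Int) :=
  match rectangles with
  | [] => []
  | (width, height) :: remaining_rects =>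
    match space with
    | (space_width, space_height, space_x, space_y) =>
      if width ≤ space_width ∧ height ≤ space_height then
        (space_x, space_y, width, height) ::
          place_rectangles (space_width - width - 1, space_height, space_x + width + 1, space_y) remaining_rects ++
          place_rectangles (width, space_height - height - 1, space_x, space_y + height + 1) remaining_rects
      else if height ≤ space_width ∧ width ≤ space_height then
        (space_x, space_y, height, width) ::
          place_rectangles (space_width - height - 1, space_height, space_x + height + 1, space_y) remaining_rects ++
          place_rectangles (height, space_height - width - 1, space_x, space_y + width + 1) remaining_rects
      else []  -- raise ValueError (outside Pre_)

-- ===== PORT B =====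
-- The while-loop of Source B: pop a task, place, push right then left subspace.
def pvRunStack (stack : List ((Int × Int × Int × Int) × List (Int × Int))) (out : List (Int × Int × Int × Int)) : List (Int × Int × Int × Int) :=
  match stack with
  | [] => out
  | ((W, H, x, y), rects) :: st =>
    match rects with
    | [] => pvRunStack st out
    | (w, h) :: rest =>
      if w ≤ W ∧ h ≤ H then
        pvRunStack (((W - w - 1, H, x + w + 1, y), rest) :: ((w, H - h - 1, x, y + h + 1), rest) :: st) (out ++ [(x, y, w, h)])
      else if h ≤ W ∧ w ≤ H then
        pvRunStack (((W - h - 1, H, x + h + 1, y), rest) :: ((h, H - w - 1, x, y + w + 1), rest) :: st) (out ++ [(x, y, h, w)])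
      else out  -- raise ValueError (outside Pre_)
termination_by (stack.map (fun t => 3 ^ t.2.length)).sum
decreasing_by
  · simp
  · have h : 0 < 3 ^ rest.length := Nat.pow_pos (by norm_num)
    simp [pow_succ]
    omega
  · have h : 0 < 3 ^ rest.length := Nat.pow_pos (by norm_num)
    simp [pow_succ]
    omega

def place_rectangles_alt (space : Int × Int × Int × Int) (rectangles : List (Int × Int)) : List (Int × Int × Int × Int) :=
  pvRunStack [(space, rectangles)] []

-- ===== PRECONDITION & SPEC =====
-- Structural fit condition on the INPUT: every rectangle, at its node of the guillotine
-- splitting tree the input determines, fits (possibly rotated) in its region. It computes no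
-- placement/output; it is exactly the condition under which Python A returns instead of
-- raising ValueError, and no flatter closed form exists for this tree-shaped domain.
def pvCanPlace (space : Int × Int × Int × Int) (rectangles : List (Int × Int)) : Bool :=
  match rectangles with
  | [] => true
  | (w, h) :: rest =>
    match space with
    | (W, H, x, y) =>
      if w ≤ W ∧ h ≤ H then
        pvCanPlace (W - w - 1, H, x + w + 1, y) rest && pvCanPlace (w, H - h - 1, x, y + h + 1) rest
      else if h ≤ W ∧ w ≤ H then
        pvCanPlace (W - h - 1, H, x + h + 1, y) rest && pvCanPlace (h, H - w - 1, x, y + w + 1) rest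
      else false

-- Pre_ excludes exactly the inputs on which Python A raises ValueError.
def Pre_place_rectangles (space : Int × Int × Int × Int) (rectangles : List (Int × Int)) : Prop :=
  pvCanPlace space rectangles = true
instance (space : Int × Int × Int × Int) (rectangles : List (Int × Int)) : Decidable (Pre_place_rectangles space rectangles) := by unfold Pre_place_rectangles; infer_instance

def pvWitness_place_rectangles : (Int × Int × Int × Int) × (List (Int × Int)) := ((10, 10, 0, 0), [(3, 2), (2, 2)])

def Spec_place_rectangles (space : Int × Int × Int × Int) (rectangles : List (Int × Int)) (out : List (Int × Int × Int × Int)) : Prop := out = place_rectangles_alt space rectangles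
instance (space : Int × Int × Int × Int) (rectangles : List (Int × Int)) (out : List (Int × Int × Int × Int)) : Decidable (Spec_place_rectangles space rectangles out) := by unfold Spec_place_rectangles; infer_instance

-- ===== CLAIM (what is proved, stated in full; the proofs are below) =====
def Claim_equal_place_rectangles : Prop := ∀ (space : Int × Int × Int × Int) (rectangles : List (Int × Int)), Dom_place_rectangles space rectangles → Pre_place_rectangles space rectangles → Spec_place_rectangles space rectangles (place_rectangles space rectangles)

-- ===== LEMMAS AND PROOFS =====

-- Running the stack machine on a placeable task prepends A's result for that task.
theorem pvRunStack_task (rects : List (Int × Int)) :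
    ∀ (space : Int × Int × Int × Int) (st : List ((Int × Int × Int × Int) × List (Int × Int)))
      (out : List (Int × Int × Int × Int)), pvCanPlace space rects = true →
      pvRunStack ((space, rects) :: st) out = pvRunStack st (out ++ place_rectangles space rects) := by
  induction rects with
  | nil =>
    intro space st out _
    obtain ⟨W, H, x, y⟩ := space
    simp [pvRunStack, place_rectangles]
  | cons r rest ih =>
    intro space st out hcan
    obtain ⟨w, h⟩ := r
    obtain ⟨W, H, x, y⟩ := space
    by_cases h1 : w ≤ W ∧ h ≤ H
    · simp only [pvCanPlace] at hcan
      rw [if_pos h1, Bool.and_eq_true] at hcan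
      rw [show pvRunStack (((W, H, x, y), (w, h) :: rest) :: st) out
            = pvRunStack (((W - w - 1, H, x + w + 1, y), rest) :: ((w, H - h - 1, x, y + h + 1), rest) :: st) (out ++ [(x, y, w, h)]) from by
            simp [pvRunStack, h1]]
      rw [ih _ _ _ hcan.1, ih _ _ _ hcan.2]
      simp [place_rectangles, h1]
    · by_cases h2 : h ≤ W ∧ w ≤ H
      · simp only [pvCanPlace] at hcan
        rw [if_neg h1, if_pos h2, Bool.and_eq_true] at hcan
        rw [show pvRunStack (((W, H, x, y), (w, h) :: rest) :: st) out
              = pvRunStack (((W - h - 1, H, x + h + 1, y), rest) :: ((h, H - w - 1, x, y + w + 1), rest) :: st) (out ++ [(x, y, h, w)]) from by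
              simp [pvRunStack, h1, h2]]
        rw [ih _ _ _ hcan.1, ih _ _ _ hcan.2]
        simp [place_rectangles, h1, h2]
      · simp [pvCanPlace, h1, h2] at hcan

-- ===== VERDICT (by name: the statement is the Claim_ definition above) =====
theorem place_rectangles_spec : Claim_equal_place_rectangles := by
  intro space rectangles _ hpre
  unfold Spec_place_rectangles place_rectangles_alt
  rw [pvRunStack_task rectangles space [] [] hpre]
  simp [pvRunStack]
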